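-- pv_equiv track=rewrite | github.com/chencath/DataRetrieval | preprocessing.py | _remove_repeated_letters
-- ===== SOURCE A (Python) =====
-- def _remove_repeated_letters(txt):
--   n = len(txt)
--   if n < 4:
--     return(txt)
--   c1, c2, c3 = txt[0], txt[1], txt[2]
--   txt2 = c1 + c2 + c3
--   for i in range(3, n):
--     if not(txt[i] == c1 == c2 == c3):
--       txt2 += txt[i]
--       c1, c2, c3 = c2, c3, txt[i]
--   return(txt2)
-- ===== SOURCE B (Python) =====
-- def _remove_repeated_letters(txt):
--     out = []
--     i, n = 0, len(txt)
--     while i < n: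
--         j = i
--         while j < n and txt[j] == txt[i]:
--             j += 1
--         out.append(txt[i] * min(j - i, 3))
--         i = j
--     return ''.join(out)
-- ===== Notes on version B (the rewrite author's own statement) =====
-- stated objective: simpler
-- what changed: Replaced A's sliding three-character window (c1,c2,c3) and incremental concatenation by a run-detection pass: find each maximal run of equal characters, emit min(run length, 3) copies, and join at the end; the n<4 guard disappears since short strings cannot contain a run over 3.
import Mathlib
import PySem

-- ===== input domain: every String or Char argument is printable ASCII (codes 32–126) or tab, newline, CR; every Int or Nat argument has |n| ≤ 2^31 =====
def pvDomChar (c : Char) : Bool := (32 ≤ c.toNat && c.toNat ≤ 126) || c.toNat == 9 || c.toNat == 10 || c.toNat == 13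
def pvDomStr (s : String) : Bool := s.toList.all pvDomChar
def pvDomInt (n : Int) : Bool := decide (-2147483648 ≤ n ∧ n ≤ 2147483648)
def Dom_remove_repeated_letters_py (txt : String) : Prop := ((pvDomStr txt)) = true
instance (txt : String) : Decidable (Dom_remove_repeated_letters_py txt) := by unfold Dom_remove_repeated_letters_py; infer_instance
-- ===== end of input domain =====

-- B replaces A's sliding three-character window with a run-detection pass (emit min(run length, 3)
-- copies of each maximal run, joined at the end) — objective: simpler.

-- ===== PORT A =====
-- one loop step of A: state (txt2, c1, c2, c3); skip txt[i] when it equals all of c1,c2,c3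
def aStep (s : List Char × Char × Char × Char) (x : Char) : List Char × Char × Char × Char :=
  if x = s.2.1 ∧ s.2.1 = s.2.2.1 ∧ s.2.2.1 = s.2.2.2 then s
  else (s.1 ++ [x], s.2.2.1, s.2.2.2, x)

def remove_repeated_letters_py (txt : String) : String :=
  if txt.toList.length < 4 then txt
  else
    match txt.toList with
    | c1 :: c2 :: c3 :: rest =>
        (String.ofList (rest.foldl aStep ([c1, c2, c3], c1, c2, c3)).1)
    | _ => txt

-- ===== PORT B =====
-- Source B's outer loop: peel off one maximal run of equal characters, emit min(run length, 3) copies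
def collapseRuns : List Char → List Char
  | [] => []
  | c :: cs =>
      List.replicate (min (1 + (cs.takeWhile (· == c)).length) 3) c
        ++ collapseRuns (cs.dropWhile (· == c))
termination_by l => l.length
decreasing_by
  simp only [List.length_cons]
  exact Nat.lt_succ_of_le (List.length_dropWhile_le _ _)

def remove_repeated_letters_py_alt (txt : String) : String :=
  String.ofList (collapseRuns txt.toList)

-- ===== PRECONDITION & SPEC =====
def Spec_remove_repeated_letters_py (txt : String) (out : String) : Prop := out = remove_repeated_letters_py_alt txt
instance (txt : String) (out : String) : Decidable (Spec_remove_repeated_letters_py txt out) := by unfold Spec_remove_repeated_letters_py; infer_instance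

-- ===== CLAIM (what is proved, stated in full; the proofs are below) =====
def Claim_equal_remove_repeated_letters_py : Prop := ∀ (txt : String), Dom_remove_repeated_letters_py txt → Spec_remove_repeated_letters_py txt (remove_repeated_letters_py txt)

-- ===== LEMMAS AND PROOFS =====

-- A's loop re-expressed with the accumulator list alone ("append x unless the last three
-- accumulated chars are all x"); the window (c1,c2,c3) is exactly the accumulator's last 3 chars.
def gStep (t : List Char) (x : Char) : List Char :=
  if t.reverse.take 3 = [x, x, x] then t else t ++ [x]

def G (t : List Char) (l : List Char) : List Char := l.foldl gStep t

theorem run_decomp (c : Char) (cs : List Char) :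
    c :: cs = List.replicate (1 + (cs.takeWhile (· == c)).length) c ++ cs.dropWhile (· == c) := by
  have h1 : cs.takeWhile (· == c) = List.replicate (cs.takeWhile (· == c)).length c := by
    apply List.eq_replicate_of_mem
    intro b hb
    have := List.mem_takeWhile_imp hb
    exact eq_of_beq this
  calc c :: cs = c :: (cs.takeWhile (· == c) ++ cs.dropWhile (· == c)) := by
        rw [List.takeWhile_append_dropWhile]
    _ = _ := by
        rw [List.replicate_add, List.replicate_one]
        simp only [List.cons_append, List.nil_append]
        rw [← h1]

theorem head?_of_take {l : List Char} {n : Nat} {x : Char} {ys : List Char}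
    (h : l.take (n + 1) = x :: ys) : l.head? = some x := by
  cases l with
  | nil => simp at h
  | cons a t =>
      rw [List.take_succ_cons] at h
      injection h with h1 _
      simp [h1]

theorem skip_run (k : Nat) (x : Char) (r t : List Char)
    (h : t.reverse.take 3 = [x, x, x]) :
    G t (List.replicate k x ++ r) = G t r := by
  induction k with
  | zero => simp
  | succ n ih =>
      rw [List.replicate_succ]
      simp only [List.cons_append, G, List.foldl_cons]
      have : gStep t x = t := by simp [gStep, h]
      rw [this]
      exact ih

theorem fresh_run (m : Nat) (x : Char) (r t : List Char)
    (h : t.getLast? ≠ some x) :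
    G t (List.replicate m x ++ r) = G (t ++ List.replicate (min m 3) x) r := by
  have hrev : t.reverse.head? ≠ some x := by
    rwa [List.head?_reverse]
  have h0 : t.reverse.take 3 ≠ [x, x, x] := fun hc => hrev (head?_of_take hc)
  have h1 : (t ++ [x]).reverse.take 3 ≠ [x, x, x] := by
    intro hc
    simp only [List.reverse_append, List.reverse_cons, List.reverse_nil, List.nil_append,
      List.cons_append, List.take_succ_cons] at hc
    injection hc with _ hc2
    exact hrev (head?_of_take hc2)
  have h2 : (t ++ [x, x]).reverse.take 3 ≠ [x, x, x] := by
    intro hc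
    simp only [List.reverse_append, List.reverse_cons, List.reverse_nil, List.nil_append,
      List.cons_append, List.take_succ_cons] at hc
    injection hc with _ hc2
    injection hc2 with _ hc3
    exact hrev (head?_of_take hc3)
  match m with
  | 0 => simp
  | 1 =>
      simp only [List.replicate_one, List.cons_append, List.nil_append, G, List.foldl_cons]
      have : gStep t x = t ++ [x] := by simp [gStep, h0]
      rw [this]; rfl
  | 2 =>
      simp only [List.replicate_succ, List.cons_append, G, List.foldl_cons]
      have e1 : gStep t x = t ++ [x] := by simp [gStep, h0]
      rw [e1]
      have e2 : gStep (t ++ [x]) x = t ++ [x, x] := by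
        simp only [gStep, if_neg h1]; simp
      rw [e2]; rfl
  | (n + 3) =>
      have hsplit : List.replicate (n + 3) x = [x, x, x] ++ List.replicate n x := by
        rw [Nat.add_comm, List.replicate_add]
        rfl
      rw [hsplit]
      simp only [List.cons_append, List.nil_append, G, List.foldl_cons]
      have e1 : gStep t x = t ++ [x] := by simp [gStep, h0]
      rw [e1]
      have e2 : gStep (t ++ [x]) x = t ++ [x, x] := by
        simp only [gStep, if_neg h1]; simp
      rw [e2]
      have e3 : gStep (t ++ [x, x]) x = t ++ [x, x, x] := by
        simp only [gStep, if_neg h2]; simp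
      rw [e3]
      have h3 : (t ++ [x, x, x]).reverse.take 3 = [x, x, x] := by
        simp [List.reverse_append]
      have := skip_run n x r (t ++ [x, x, x]) h3
      simp only [G] at this ⊢
      rw [this]
      have h4 : min (n + 3) 3 = 3 := by omega
      rw [h4]
      rfl

theorem getLast?_append_replicate_succ (t : List Char) (j : Nat) (c : Char) :
    (t ++ List.replicate (j + 1) c).getLast? = some c := by
  rw [List.getLast?_append_of_ne_nil]
  · simp [List.getLast?_replicate]
  · simp

theorem G_all : ∀ (n : Nat) (l t : List Char), l.length ≤ n →
    (∀ x, l.head? = some x → t.getLast? ≠ some x) →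
    G t l = t ++ collapseRuns l := by
  intro n
  induction n with
  | zero =>
      intro l t hl _
      have : l = [] := List.eq_nil_of_length_eq_zero (Nat.le_zero.mp hl)
      subst this
      simp [G, collapseRuns]
  | succ n ih =>
      intro l t hl hfresh
      cases l with
      | nil => simp [G, collapseRuns]
      | cons c cs =>
          have hfr : t.getLast? ≠ some c := hfresh c (by simp)
          have hdec := run_decomp c cs
          conv_lhs => rw [hdec]
          rw [fresh_run _ c _ t hfr]
          have hmin : ∃ j, min (1 + (cs.takeWhile (· == c)).length) 3 = j + 1 := by
            refine ⟨min (cs.takeWhile (· == c)).length 2, by omega⟩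
          obtain ⟨j, hj⟩ := hmin
          have hlast : (t ++ List.replicate (min (1 + (cs.takeWhile (· == c)).length) 3) c).getLast? = some c := by
            rw [hj]; exact getLast?_append_replicate_succ t j c
          have hlen : (cs.dropWhile (· == c)).length ≤ n := by
            have := List.length_dropWhile_le (· == c) cs
            have : (cs.dropWhile (· == c)).length ≤ cs.length := this
            simp only [List.length_cons] at hl
            omega
          have hfresh' : ∀ x, (cs.dropWhile (· == c)).head? = some x →
              (t ++ List.replicate (min (1 + (cs.takeWhile (· == c)).length) 3) c).getLast? ≠ some x := by
            intro x hx
            rw [hlast]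
            intro hcx
            have hxc : x ≠ c := by
              have := List.head?_dropWhile_not (· == c) cs
              rw [hx] at this
              simp at this
              intro h; exact this (by simp [h])
            exact hxc (by injection hcx with h; exact h.symm)
          rw [ih _ _ hlen hfresh']
          conv_rhs => rw [show collapseRuns (c :: cs) =
            List.replicate (min (1 + (cs.takeWhile (· == c)).length) 3) c
              ++ collapseRuns (cs.dropWhile (· == c)) from by rw [collapseRuns]]
          simp [List.append_assoc]

theorem collapseRuns_short : ∀ (n : Nat) (l : List Char), l.length ≤ n → l.length ≤ 3 →
    collapseRuns l = l := by
  intro n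
  induction n with
  | zero =>
      intro l hl _
      have : l = [] := List.eq_nil_of_length_eq_zero (Nat.le_zero.mp hl)
      subst this; simp [collapseRuns]
  | succ n ih =>
      intro l hl h3
      cases l with
      | nil => simp [collapseRuns]
      | cons c cs =>
          rw [collapseRuns]
          have htw : (cs.takeWhile (· == c)).length ≤ cs.length := by
            have := (cs.takeWhile (· == c)).sublist_append_left (cs.dropWhile (· == c))
            rw [List.takeWhile_append_dropWhile] at this
            exact this.length_le
          have hmin : min (1 + (cs.takeWhile (· == c)).length) 3 = 1 + (cs.takeWhile (· == c)).length := by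
            simp only [List.length_cons] at h3
            omega
          have hdrop : (cs.dropWhile (· == c)).length ≤ n := by
            have := List.length_dropWhile_le (· == c) cs
            simp only [List.length_cons] at hl
            omega
          have hdrop3 : (cs.dropWhile (· == c)).length ≤ 3 := by
            have := List.length_dropWhile_le (· == c) cs
            simp only [List.length_cons] at h3
            omega
          rw [hmin, ih _ hdrop hdrop3]
          exact (run_decomp c cs).symm

theorem window_bridge : ∀ (r : List Char) (t0 : List Char) (a b c : Char),
    (r.foldl aStep (t0 ++ [a, b, c], a, b, c)).1 = G (t0 ++ [a, b, c]) r := by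
  intro r
  induction r with
  | nil => intro t0 a b c; simp [G]
  | cons x xs ih =>
      intro t0 a b c
      simp only [List.foldl_cons, G]
      have hcondeq : ((t0 ++ [a, b, c]).reverse.take 3 = [x, x, x]) ↔ (x = a ∧ a = b ∧ b = c) := by
        simp only [List.reverse_append, List.reverse_cons, List.reverse_nil, List.nil_append,
          List.cons_append, List.take, List.cons.injEq, and_true]
        constructor
        · rintro ⟨h1, h2, h3⟩; subst h1; subst h2; subst h3; exact ⟨rfl, rfl, rfl⟩
        · rintro ⟨h1, h2, h3⟩; subst h1; rw [h2, h3]; exact ⟨rfl, rfl, rfl⟩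
      by_cases hc : x = a ∧ a = b ∧ b = c
      · have e1 : aStep (t0 ++ [a, b, c], a, b, c) x = (t0 ++ [a, b, c], a, b, c) := by
          simp [aStep, hc]
        have e2 : gStep (t0 ++ [a, b, c]) x = t0 ++ [a, b, c] := by
          unfold gStep
          rw [if_pos (hcondeq.mpr hc)]
        rw [e1, e2]
        exact ih t0 a b c
      · have e1 : aStep (t0 ++ [a, b, c], a, b, c) x = (t0 ++ [a, b, c] ++ [x], b, c, x) := by
          simp [aStep, hc]
        have e2 : gStep (t0 ++ [a, b, c]) x = t0 ++ [a, b, c] ++ [x] := by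
          simp only [gStep, if_neg (fun h => hc (hcondeq.mp h))]
        rw [e1, e2]
        have : t0 ++ [a, b, c] ++ [x] = (t0 ++ [a]) ++ [b, c, x] := by simp
        rw [this]
        exact ih (t0 ++ [a]) b c x

theorem G_start (c1 c2 c3 : Char) (rest : List Char) :
    G [] (c1 :: c2 :: c3 :: rest) = G [c1, c2, c3] rest := by
  simp only [G, List.foldl_cons]
  have e1 : gStep [] c1 = [c1] := by simp [gStep]
  have e2 : gStep [c1] c2 = [c1, c2] := by simp [gStep]
  have e3 : gStep [c1, c2] c3 = [c1, c2, c3] := by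
    simp only [gStep]
    split
    · next h => simp [List.take] at h
    · rfl
  rw [e1, e2, e3]

-- ===== VERDICT (by name: the statement is the Claim_ definition above) =====
theorem remove_repeated_letters_py_spec : Claim_equal_remove_repeated_letters_py := by
  intro txt _
  unfold Spec_remove_repeated_letters_py remove_repeated_letters_py remove_repeated_letters_py_alt
  by_cases hlen : txt.toList.length < 4
  · rw [if_pos hlen, collapseRuns_short txt.toList.length _ le_rfl (by omega), String.ofList_toList]
  · rw [if_neg hlen]
    match hm : txt.toList with
    | [] => simp [hm] at hlen
    | [c1] => simp [hm] at hlen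
    | [c1, c2] => simp [hm] at hlen
    | [c1, c2, c3] => simp [hm] at hlen
    | c1 :: c2 :: c3 :: rest =>
        show String.ofList (List.foldl aStep ([c1, c2, c3], c1, c2, c3) rest).1
          = String.ofList (collapseRuns (c1 :: c2 :: c3 :: rest))
        have hw := window_bridge rest [] c1 c2 c3
        simp only [List.nil_append] at hw
        rw [hw, ← G_start]
        congr 1
        rw [G_all (c1 :: c2 :: c3 :: rest).length _ [] le_rfl (by intro x _; simp)]
        simp
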